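-- pv_equiv track=rewrite | github.com/eoc940/Python-data_structure-and-algorithm_PS | programmers-algorythm/stock_price.py | solution
-- ===== SOURCE A (Python) =====
-- def solution(prices):
--     answer = []
--     for i in range(len(prices)) :
--         tmp = []
--         for j in range(i+1,len(prices)) :
--             tmp.append(1)
--             if prices[i] <= prices[j] :
--                 continue
--             else :
--                 break
--         answer.append(sum(tmp))
--
--     return answer
-- ===== SOURCE B (Python) =====
-- def solution(prices):
--     n = len(prices)
--     answer = [0] * n
--     stack = []
--     for i, p in enumerate(prices):
--         while stack and prices[stack[-1]] > p:
--             t = stack.pop()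
--             answer[t] = i - t
--         stack.append(i)
--     for t in stack:
--         answer[t] = n - 1 - t
--     return answer
-- ===== Notes on version B (the rewrite author's own statement) =====
-- stated objective: faster
-- what changed: Replaced the per-index forward rescan (for each i, scan j=i+1.. until a smaller price) by a single pass with a monotonic index stack: pop indices whose price drops and record elapsed time, flush survivors at the end.
import Mathlib
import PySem

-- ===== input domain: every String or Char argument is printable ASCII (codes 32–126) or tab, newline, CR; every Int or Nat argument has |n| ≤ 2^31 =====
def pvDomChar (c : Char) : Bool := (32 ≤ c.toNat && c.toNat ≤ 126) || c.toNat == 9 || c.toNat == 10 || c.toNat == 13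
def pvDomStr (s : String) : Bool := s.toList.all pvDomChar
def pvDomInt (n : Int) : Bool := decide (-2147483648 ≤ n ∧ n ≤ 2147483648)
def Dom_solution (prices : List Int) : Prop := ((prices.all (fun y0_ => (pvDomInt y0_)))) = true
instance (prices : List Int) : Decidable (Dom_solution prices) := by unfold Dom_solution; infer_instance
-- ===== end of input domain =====

-- B replaces A's quadratic per-index rescan by a one-pass monotonic index stack (asymptotically faster); return values proved equal.

-- ===== PORT A =====
-- inner 'for j in range(i+1, len(prices))' loop of A: builds tmp, 'break' = stop recursing
def innerA (prices : List Int) (pi_ : Int) : List Int → List Int → List Int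
  | [], tmp => tmp
  | j :: rest, tmp =>
      let tmp' := tmp ++ [1]
      if pi_ ≤ PySem.List.pyGetD prices j 0 then innerA prices pi_ rest tmp'
      else tmp'

def solution (prices : List Int) : List Int :=
  (PySem.List.pyRange 0 prices.length 1).foldl
    (fun answer i =>
      let tmp := innerA prices (PySem.List.pyGetD prices i 0) (PySem.List.pyRange (i + 1) prices.length 1) []
      answer ++ [tmp.sum]) []

-- ===== PORT B =====
-- the 'while stack and prices[stack[-1]] > p' loop of B (stack top = list head)
def popLoop (prices : List Int) (p : Int) (i : Int) : List Int → List Int → List Int × List Int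
  | [], answer => ([], answer)
  | t :: rest, answer =>
      if PySem.List.pyGetD prices t 0 > p then
        popLoop prices p i rest (PySem.List.pySetD answer t (i - t))
      else (t :: rest, answer)

def solution_alt (prices : List Int) : List Int :=
  let n := prices.length
  let st := (PySem.List.enumerate prices 0).foldl
    (fun st ip =>
      let r := popLoop prices ip.2 ip.1 st.1 st.2
      (ip.1 :: r.1, r.2))
    ([], List.replicate n 0)
  st.1.foldl (fun ans t => PySem.List.pySetD ans t ((n : Int) - 1 - t)) st.2

-- ===== PRECONDITION & SPEC =====
def Spec_solution (prices : List Int) (out : List Int) : Prop := out = solution_alt prices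
instance (prices : List Int) (out : List Int) : Decidable (Spec_solution prices out) := by unfold Spec_solution; infer_instance

-- ===== CLAIM (what is proved, stated in full; the proofs are below) =====
def Claim_equal_solution : Prop := ∀ (prices : List Int), Dom_solution prices → Spec_solution prices (solution prices)

-- ===== LEMMAS AND PROOFS =====

def cnt (pi_ : Int) : List Int → Int
  | [] => 0
  | x :: xs => if pi_ ≤ x then 1 + cnt pi_ xs else 1

def specv (prices : List Int) (j : Nat) : Int := cnt (prices.getD j 0) (prices.drop (j + 1))

theorem innerA_append (prices : List Int) (pi_ : Int) :
    ∀ (js tmp : List Int), innerA prices pi_ js tmp = tmp ++ innerA prices pi_ js [] := by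
  intro js
  induction js with
  | nil => intro tmp; simp [innerA]
  | cons j rest ih =>
      intro tmp
      simp only [innerA]
      split_ifs with h
      · rw [ih (tmp ++ [1]), ih ([] ++ [1])]
        simp
      · simp

theorem innerA_sum (prices : List Int) (pi_ : Int) :
    ∀ (l : List Int) (a : Nat), prices.drop a = l →
      (innerA prices pi_ (PySem.List.pyRange (a : Int) prices.length 1) []).sum = cnt pi_ l := by
  intro l
  induction l with
  | nil =>
      intro a ha
      rw [PySem.List.pyRange_one_eq_nil (by
        have := List.drop_eq_nil_iff.mp ha
        exact_mod_cast this)]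
      simp [innerA, cnt]
  | cons x xs ih =>
      intro a ha
      have hlen : a < prices.length := by
        by_contra h
        rw [List.drop_eq_nil_of_le (by omega)] at ha
        simp at ha
      have hx : prices.getD a 0 = x := by
        have h0 : (prices.drop a).getD 0 0 = x := by rw [ha]; rfl
        simpa [List.getD, List.getElem?_drop] using h0
      have hxs : prices.drop (a + 1) = xs := by
        have h1 : (prices.drop a).drop 1 = xs := by rw [ha]; rfl
        simpa [List.drop_drop] using h1
      rw [PySem.List.pyRange_one_cons (by exact_mod_cast hlen)]
      simp only [innerA]
      have hget : PySem.List.pyGetD prices (a : Int) 0 = x := by simpa using hx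
      rw [hget]
      have hc : ((a : Int) + 1) = ((a + 1 : Nat) : Int) := by push_cast; ring
      split_ifs with h
      · rw [innerA_append]
        simp only [List.sum_append, List.nil_append, List.sum_cons, List.sum_nil]
        rw [hc, ih (a + 1) hxs]
        simp [cnt, h]
      · simp [cnt, h]

-- A returns, for each index j, the seconds counted against the remaining prices
theorem solution_eq_map (prices : List Int) :
    solution prices = (List.range prices.length).map (specv prices) := by
  unfold solution
  rw [PySem.List.foldl_append_singleton_eq_map]
  rw [PySem.List.pyRange_zero_nat, List.map_map]
  apply List.map_congr_left
  intro j hj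
  simp only [Function.comp]
  have hc : ((j : Int) + 1) = ((j + 1 : Nat) : Int) := by push_cast; ring
  rw [hc, innerA_sum prices _ (prices.drop (j+1)) (j+1) rfl]
  simp [specv]

-- cnt when the first strictly smaller element is at position d
theorem cnt_firstDrop (pi_ : Int) :
    ∀ (l : List Int) (d : Nat), d < l.length → l.getD d 0 < pi_ →
      (∀ k, k < d → pi_ ≤ l.getD k 0) → cnt pi_ l = (d : Int) + 1 := by
  intro l
  induction l with
  | nil => intro d hd; simp at hd
  | cons x xs ih =>
      intro d hd hlt hge
      match d with
      | 0 =>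
          have hx : x < pi_ := by simpa using hlt
          simp [cnt, not_le.mpr hx]
      | d + 1 =>
          have hx : pi_ ≤ x := by simpa using hge 0 (by omega)
          have := ih d (by simpa using hd) (by simpa using hlt)
            (fun k hk => by simpa using hge (k + 1) (by omega))
          simp only [cnt, if_pos hx, this]
          push_cast
          ring
  
-- cnt when no element is strictly smaller
theorem cnt_all_ge (pi_ : Int) :
    ∀ l : List Int, (∀ k, k < l.length → pi_ ≤ l.getD k 0) → cnt pi_ l = (l.length : Int) := by
  intro l
  induction l with
  | nil => intro _; simp [cnt]
  | cons x xs ih =>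
      intro h
      have hx : pi_ ≤ x := by simpa using h 0 (by simp)
      have := ih (fun k hk => by simpa using h (k + 1) (by simpa using hk))
      simp [cnt, hx, this]
      ring

theorem popLoop_spec (prices : List Int) (p : Int) (i : Int) :
    ∀ (stack answer : List Int),
      stack.Pairwise (fun a b => b < a ∧ PySem.List.pyGetD prices b 0 ≤ PySem.List.pyGetD prices a 0) →
      (∀ t ∈ stack, ∃ j : Nat, t = (j : Int) ∧ j < prices.length) →
      answer.length = prices.length →
      (popLoop prices p i stack answer).1.Sublist stack ∧
      (∀ t, t ∈ (popLoop prices p i stack answer).1 ↔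
        t ∈ stack ∧ PySem.List.pyGetD prices t 0 ≤ p) ∧
      (popLoop prices p i stack answer).2.length = prices.length ∧
      (∀ j : Nat, j < prices.length →
        (popLoop prices p i stack answer).2.getD j 0 =
          if (j : Int) ∈ stack ∧ p < PySem.List.pyGetD prices j 0 then i - (j : Int)
          else answer.getD j 0) := by
  intro stack
  induction stack with
  | nil =>
      intro answer _ _ hlen
      refine ⟨by simp [popLoop], by simp [popLoop], by simpa [popLoop], ?_⟩
      intro j hj
      simp [popLoop]
  | cons t rest ih =>
      intro answer hpair hmem hlen
      obtain ⟨j0, rfl, hj0⟩ := hmem _ (List.mem_cons_self ..)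
      have hpr : rest.Pairwise _ := hpair.of_cons
      have hhead : ∀ u ∈ rest, u < (j0 : Int) ∧
          PySem.List.pyGetD prices u 0 ≤ PySem.List.pyGetD prices (j0 : Int) 0 :=
        fun u hu => List.rel_of_pairwise_cons hpair hu
      have hnotmem : (j0 : Int) ∉ rest := fun h => by
        have := (hhead _ h).1; omega
      by_cases h : PySem.List.pyGetD prices (j0 : Int) 0 > p
      · -- pop j0
        have hset : (PySem.List.pySetD answer ((j0 : Nat) : Int) (i - (j0 : Int))).length
            = prices.length := by
          simp [hlen]
        obtain ⟨S, M, L, G⟩ := ih (PySem.List.pySetD answer ((j0 : Nat) : Int) (i - (j0 : Int)))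
          hpr (fun u hu => hmem u (List.mem_cons_of_mem _ hu)) hset
        have hstep : popLoop prices p i ((j0 : Int) :: rest) answer
            = popLoop prices p i rest (PySem.List.pySetD answer ((j0 : Nat) : Int) (i - (j0 : Int))) := by
          simp only [popLoop]
          rw [if_pos h]
        rw [hstep]
        refine ⟨S.trans (List.sublist_cons_self _ _), ?_, L, ?_⟩
        · intro u
          rw [M u]
          constructor
          · rintro ⟨hu, hle⟩; exact ⟨List.mem_cons_of_mem _ hu, hle⟩
          · rintro ⟨hu, hle⟩
            rcases List.mem_cons.mp hu with rfl | hu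
            · omega
            · exact ⟨hu, hle⟩
        · intro j hj
          rw [G j hj]
          by_cases hjj : j = j0
          · subst hjj
            rw [if_neg (fun hc => hnotmem hc.1), if_pos ⟨List.mem_cons_self .., h⟩]
            rw [PySem.List.pySetD_natCast]
            rw [List.getD_eq_getElem _ _ (by rw [List.length_set]; omega)]
            exact List.getElem_set_self (by simp; omega)
          · have hcast : ((j : Nat) : Int) ≠ ((j0 : Nat) : Int) := by exact_mod_cast hjj
            have hgd : (PySem.List.pySetD answer ((j0 : Nat) : Int) (i - (j0 : Int))).getD j 0
                = answer.getD j 0 := by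
              rw [PySem.List.pySetD_natCast]
              by_cases hjl : j < answer.length
              · rw [List.getD_eq_getElem _ _ (by rw [List.length_set]; omega),
                    List.getD_eq_getElem _ _ hjl]
                rw [List.getElem_set]; simp [Ne.symm hjj]
              · rw [List.getD_eq_default _ _ (by rw [List.length_set]; omega),
                    List.getD_eq_default _ _ (by omega)]
            rw [hgd]
            congr 1
            simp only [List.mem_cons, eq_iff_iff]
            constructor
            · rintro ⟨hu, hlt⟩; exact ⟨Or.inr hu, hlt⟩
            · rintro ⟨hu, hlt⟩
              rcases hu with hu | hu
              · exact absurd hu hcast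
              · exact ⟨hu, hlt⟩
      · -- stop: price at top ≤ p
        rw [not_lt] at h
        have hstep : popLoop prices p i ((j0 : Int) :: rest) answer = ((j0 : Int) :: rest, answer) := by
          simp only [popLoop]
          rw [if_neg (not_lt.mpr h)]
        rw [hstep]
        refine ⟨List.Sublist.refl _, ?_, hlen, ?_⟩
        · intro u
          constructor
          · intro hu
            refine ⟨hu, ?_⟩
            rcases List.mem_cons.mp hu with rfl | hu
            · exact h
            · exact le_trans (hhead _ hu).2 h
          · exact fun hu => hu.1
        · intro j hj
          rw [if_neg]
          rintro ⟨hu, hlt⟩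
          rcases List.mem_cons.mp hu with he | hu
          · rw [he] at hlt; omega
          · have := (hhead _ hu).2; omega

-- loop invariant for B's main pass, after the first m prices have been processed
def BInv (prices : List Int) (m : Nat) (stack answer : List Int) : Prop :=
  m ≤ prices.length ∧
  answer.length = prices.length ∧
  (∀ t ∈ stack, ∃ j : Nat, t = (j : Int) ∧ j < m) ∧
  stack.Pairwise (fun a b => b < a ∧ PySem.List.pyGetD prices b 0 ≤ PySem.List.pyGetD prices a 0) ∧
  (∀ j : Nat, j < m → ((j : Int) ∈ stack ↔
      ∀ k : Nat, j < k → k < m → prices.getD j 0 ≤ prices.getD k 0)) ∧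
  (∀ j : Nat, j < m → (j : Int) ∉ stack → answer.getD j 0 = specv prices j)

theorem loop_inv (prices : List Int) :
    ∀ (l : List Int) (m : Nat) (stack answer : List Int), prices.drop m = l →
      BInv prices m stack answer →
      BInv prices prices.length
        ((PySem.List.enumerate l (m : Int)).foldl
          (fun st ip =>
            let r := popLoop prices ip.2 ip.1 st.1 st.2
            (ip.1 :: r.1, r.2)) (stack, answer)).1
        ((PySem.List.enumerate l (m : Int)).foldl
          (fun st ip =>
            let r := popLoop prices ip.2 ip.1 st.1 st.2
            (ip.1 :: r.1, r.2)) (stack, answer)).2 := by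
  intro l
  induction l with
  | nil =>
      intro m stack answer hdrop hinv
      have hm : prices.length ≤ m := by
        simpa using List.drop_eq_nil_iff.mp hdrop
      have : m = prices.length := by have := hinv.1; omega
      subst this
      simpa [PySem.List.enumerate_nil] using hinv
  | cons p rest ih =>
      intro m stack answer hdrop hinv
      obtain ⟨hmn, hlen, hmem, hpair, hchar, hans⟩ := hinv
      have hm : m < prices.length := by
        by_contra hc
        rw [List.drop_eq_nil_of_le (by omega)] at hdrop
        simp at hdrop
      have hp : prices.getD m 0 = p := by
        have h0 : (prices.drop m).getD 0 0 = p := by rw [hdrop]; rfl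
        simpa [List.getD, List.getElem?_drop] using h0
      have hrest : prices.drop (m + 1) = rest := by
        have h1 : (prices.drop m).drop 1 = rest := by rw [hdrop]; rfl
        simpa [List.drop_drop] using h1
      obtain ⟨S, M, L, G⟩ := popLoop_spec prices p (m : Int) stack answer hpair
        (fun t ht => by obtain ⟨j, rfl, hj⟩ := hmem t ht; exact ⟨j, rfl, by omega⟩) hlen
      rw [PySem.List.enumerate_cons]
      simp only [List.foldl_cons]
      have hcast : ((m : Int) + 1) = ((m + 1 : Nat) : Int) := by push_cast; ring
      rw [hcast]
      set s' := (popLoop prices p (m : Int) stack answer).1 with hs'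
      set a' := (popLoop prices p (m : Int) stack answer).2 with ha'
      apply ih (m + 1) ((m : Int) :: s') a' hrest
      have hgm : PySem.List.pyGetD prices ((m : Nat) : Int) 0 = p := by simpa using hp
      refine ⟨by omega, L, ?_, ?_, ?_, ?_⟩
      · intro t ht
        rcases List.mem_cons.mp ht with rfl | ht
        · exact ⟨m, rfl, by omega⟩
        · obtain ⟨j, rfl, hj⟩ := hmem t ((M t).mp ht).1
          exact ⟨j, rfl, by omega⟩
      · refine List.Pairwise.cons ?_ (hpair.sublist S)
        intro u hu
        obtain ⟨humem, hule⟩ := (M u).mp hu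
        obtain ⟨j, rfl, hj⟩ := hmem _ humem
        refine ⟨by exact_mod_cast hj, by rw [hgm]; exact hule⟩
      · intro j hj
        by_cases hjm : j = m
        · subst hjm
          simp only [List.mem_cons]
          constructor
          · intro _ k hk1 hk2; omega
          · intro _; exact Or.inl trivial
        · have hjm' : j < m := by omega
          have hne : ((j : Nat) : Int) ≠ ((m : Nat) : Int) := by
            intro h; exact hjm (by exact_mod_cast h)
          rw [List.mem_cons]
          constructor
          · rintro (he | hj')
            · exact absurd he hne
            · obtain ⟨hjst, hjle⟩ := (M _).mp hj'
              intro k hk1 hk2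
              by_cases hkm : k = m
              · subst hkm
                rw [hp]
                simpa using hjle
              · exact ((hchar j hjm').mp hjst) k hk1 (by omega)
          · intro hall
            right
            rw [M]
            constructor
            · exact (hchar j hjm').mpr (fun k hk1 hk2 => hall k hk1 (by omega))
            · have := hall m hjm' (by omega)
              rw [hp] at this
              simpa using this
      · intro j hj hnot
        have hjne : j ≠ m := fun he => hnot (by rw [he]; exact List.mem_cons_self ..)
        have hjm' : j < m := by omega
        have hnot' : ((j : Nat) : Int) ∉ s' := fun h => hnot (List.mem_cons_of_mem _ h)
        rw [G j (by omega)]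
        by_cases hcond : ((j : Nat) : Int) ∈ stack ∧ p < PySem.List.pyGetD prices (j : Int) 0
        · rw [if_pos hcond]
          obtain ⟨hjst, hplt⟩ := hcond
          have hgj : PySem.List.pyGetD prices ((j : Nat) : Int) 0 = prices.getD j 0 := by simp
          rw [hgj] at hplt
          have hd : m - (j + 1) < (prices.drop (j + 1)).length := by
            rw [List.length_drop]; omega
          have hadd : j + 1 + (m - (j + 1)) = m := by omega
          have hgd : (prices.drop (j + 1)).getD (m - (j + 1)) 0 = prices.getD m 0 := by
            simp [List.getD, List.getElem?_drop, hadd]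
          have := cnt_firstDrop (prices.getD j 0) (prices.drop (j + 1)) (m - (j + 1)) hd
            (by rw [hgd, hp]; exact hplt)
            (fun k hk => by
              have hk' : (prices.drop (j + 1)).getD k 0 = prices.getD (j + 1 + k) 0 := by
                simp [List.getD, List.getElem?_drop]
              rw [hk']
              exact ((hchar j hjm').mp hjst) (j + 1 + k) (by omega) (by omega))
          rw [specv, this]
          have : ((m - (j + 1) : Nat) : Int) = (m : Int) - (j : Int) - 1 := by
            push_cast [Nat.cast_sub (by omega : j + 1 ≤ m)]; ring
          rw [this]; ring
        · rw [if_neg hcond]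
          apply hans j hjm'
          intro hjst
          rcases not_and_or.mp hcond with hc | hc
          · exact hc hjst
          · rw [not_lt] at hc
            exact hnot' ((M _).mpr ⟨hjst, hc⟩)

-- B's final flush loop writes the no-drop value at each index remaining on the stack
theorem final_loop (prices : List Int) :
    ∀ (st ans : List Int), ans.length = prices.length →
      (∀ t ∈ st, ∃ j : Nat, t = (j : Int) ∧ j < prices.length ∧
        specv prices j = (prices.length : Int) - 1 - t) →
      (∀ j : Nat, j < prices.length → (j : Int) ∉ st → ans.getD j 0 = specv prices j) →
      (st.foldl (fun a t => PySem.List.pySetD a t ((prices.length : Int) - 1 - t)) ans).length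
          = prices.length ∧
      (∀ j : Nat, j < prices.length →
        (st.foldl (fun a t => PySem.List.pySetD a t ((prices.length : Int) - 1 - t)) ans).getD j 0
          = specv prices j) := by
  intro st
  induction st with
  | nil => intro ans hlen _ hval; exact ⟨hlen, fun j hj => hval j hj (by simp)⟩
  | cons t rest ih =>
      intro ans hlen hmem hval
      obtain ⟨j0, rfl, hj0, hspec⟩ := hmem _ (List.mem_cons_self ..)
      simp only [List.foldl_cons]
      rw [PySem.List.pySetD_natCast]
      apply ih
      · rw [List.length_set]; exact hlen
      · exact fun u hu => hmem u (List.mem_cons_of_mem _ hu)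
      · intro j hj hnot
        by_cases hjj : j = j0
        · subst hjj
          rw [List.getD_eq_getElem _ _ (by rw [List.length_set]; omega)]
          rw [List.getElem_set_self (by simp; omega)]
          exact hspec.symm
        · rw [List.getD_eq_getElem _ _ (by rw [List.length_set]; omega),
              List.getElem_set]
          simp only [if_neg (Ne.symm hjj)]
          rw [← List.getD_eq_getElem _ _ (by omega)]
          apply hval j hj
          intro hc
          rcases List.mem_cons.mp hc with he | hc'
          · exact hjj (by exact_mod_cast he)
          · exact hnot hc'

theorem solution_alt_eq_map (prices : List Int) :
    solution_alt prices = (List.range prices.length).map (specv prices) := by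
  unfold solution_alt
  have hinv0 : BInv prices 0 [] (List.replicate prices.length 0) := by
    refine ⟨by omega, by simp, by simp, by simp, ?_, ?_⟩ <;> intro j hj <;> omega
  have hinv := loop_inv prices prices 0 [] (List.replicate prices.length 0) (by simp) hinv0
  obtain ⟨-, hlen, hmem, -, hchar, hans⟩ := hinv
  have hfin := final_loop prices _ _ hlen
    (fun t ht => by
      obtain ⟨j, rfl, hj⟩ := hmem t ht
      refine ⟨j, rfl, hj, ?_⟩
      have hall := (hchar j hj).mp ht
      have := cnt_all_ge (prices.getD j 0) (prices.drop (j + 1)) (fun k hk => by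
        have hk' : (prices.drop (j + 1)).getD k 0 = prices.getD (j + 1 + k) 0 := by
          simp [List.getD, List.getElem?_drop]
        rw [hk']
        exact hall (j + 1 + k) (by omega) (by rw [List.length_drop] at hk; omega))
      rw [specv, this, List.length_drop]
      push_cast [Nat.cast_sub (by omega : j + 1 ≤ prices.length)]
      ring)
    hans
  obtain ⟨hflen, hfval⟩ := hfin
  have key : ∀ (res : List Int), res.length = prices.length →
      (∀ j : Nat, j < prices.length → res.getD j 0 = specv prices j) →
      res = (List.range prices.length).map (specv prices) := by
    intro res hl hv
    apply List.ext_getElem (by simpa using hl)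
    intro j h1 h2
    have hj : j < prices.length := by omega
    have := hv j hj
    rw [List.getD_eq_getElem _ _ h1] at this
    simpa using this
  exact key _ hflen hfval

-- ===== VERDICT (by name: the statement is the Claim_ definition above) =====
theorem solution_spec : Claim_equal_solution := by
  intro prices _
  unfold Spec_solution
  rw [solution_eq_map, solution_alt_eq_map]
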